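-- pv_equiv track=rewrite | github.com/girdav01/AITF | integrations/litellm/sdk/instrumentor.py | _detect_provider_and_model
-- ===== SOURCE A (Python) =====
-- _PROVIDER_PREFIXES = {
--     "openai/": "openai",
--     "anthropic/": "anthropic",
--     "azure/": "azure",
--     "google/": "google",
--     "vertex_ai/": "google",
--     "bedrock/": "aws",
--     "cohere/": "cohere",
--     "mistral/": "mistral",
--     "deepseek/": "deepseek",
--     "groq/": "groq",
--     "together_ai/": "together",
--     "anyscale/": "anyscale",
--     "ollama/": "ollama",
--     "huggingface/": "huggingface",
--     "replicate/": "replicate",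
--     "sagemaker/": "aws",
-- }
--
-- _MODEL_PROVIDER_HINTS: dict[str, str] = {
--     "gpt-": "openai",
--     "o1": "openai",
--     "o3": "openai",
--     "claude-": "anthropic",
--     "gemini-": "google",
--     "mistral-": "mistral",
--     "command-": "cohere",
--     "llama-": "meta",
-- }
--
-- def _detect_provider_and_model(model: str) -> tuple[str, str]:
--     """Split a LiteLLM model string into (provider, model_name)."""
--     for prefix, provider in _PROVIDER_PREFIXES.items():
--         if model.startswith(prefix):
--             return provider, model[len(prefix):]
--
--     for hint, provider in _MODEL_PROVIDER_HINTS.items():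
--         if model.startswith(hint):
--             return provider, model
--
--     return "unknown", model
-- ===== SOURCE B (Python) =====
-- _PROVIDER_PREFIXES = {
--     "openai/": "openai",
--     "anthropic/": "anthropic",
--     "azure/": "azure",
--     "google/": "google",
--     "vertex_ai/": "google",
--     "bedrock/": "aws",
--     "cohere/": "cohere",
--     "mistral/": "mistral",
--     "deepseek/": "deepseek",
--     "groq/": "groq",
--     "together_ai/": "together",
--     "anyscale/": "anyscale",
--     "ollama/": "ollama",
--     "huggingface/": "huggingface",
--     "replicate/": "replicate",
--     "sagemaker/": "aws",
-- }
--
-- _MODEL_PROVIDER_HINTS: dict[str, str] = {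
--     "gpt-": "openai",
--     "o1": "openai",
--     "o3": "openai",
--     "claude-": "anthropic",
--     "gemini-": "google",
--     "mistral-": "mistral",
--     "command-": "cohere",
--     "llama-": "meta",
-- }
--
-- # A character trie over ALL 24 keys (provider prefixes and model hints together).
-- # Each terminal stores (provider, strip) where strip is the number of leading
-- # characters to drop from the model (len(prefix) for provider keys, 0 for hints).
-- # Correct because no key is a prefix of another key, so at most one key matches
-- # any model string and the two tables' match order is irrelevant.
-- _TRIE: dict = {}
--
--
-- def _add(key: str, value: tuple) -> None:
--     node = _TRIE
--     for ch in key: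
--         node = node.setdefault(ch, {})
--     node[""] = value
--
--
-- for _pfx, _prov in _PROVIDER_PREFIXES.items():
--     _add(_pfx, (_prov, len(_pfx)))
-- for _hint, _prov in _MODEL_PROVIDER_HINTS.items():
--     _add(_hint, (_prov, 0))
--
--
-- def _lookup(node: dict, s: str):
--     val = node.get("")
--     if val is not None:
--         return val
--     if not s:
--         return None
--     child = node.get(s[0])
--     if child is None:
--         return None
--     return _lookup(child, s[1:])
--
--
-- def _detect_provider_and_model(model: str) -> tuple[str, str]:
--     """Split a LiteLLM model string into (provider, model_name)."""
--     hit = _lookup(_TRIE, model)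
--     if hit is None:
--         return "unknown", model
--     provider, strip = hit
--     return provider, model[strip:]
-- ===== Notes on version B (the rewrite author's own statement) =====
-- stated objective: alternative
-- what changed: B builds one character trie over all 24 keys (provider prefixes and model hints together, each terminal storing the provider and how much to strip) and answers by a single recursive walk down the trie along the model's characters, replacing A's two sequential linear scans that call startswith on every table key; this is correct because no key is a prefix of another, so at most one key can match and table order is irrelevant.
import Mathlib
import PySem

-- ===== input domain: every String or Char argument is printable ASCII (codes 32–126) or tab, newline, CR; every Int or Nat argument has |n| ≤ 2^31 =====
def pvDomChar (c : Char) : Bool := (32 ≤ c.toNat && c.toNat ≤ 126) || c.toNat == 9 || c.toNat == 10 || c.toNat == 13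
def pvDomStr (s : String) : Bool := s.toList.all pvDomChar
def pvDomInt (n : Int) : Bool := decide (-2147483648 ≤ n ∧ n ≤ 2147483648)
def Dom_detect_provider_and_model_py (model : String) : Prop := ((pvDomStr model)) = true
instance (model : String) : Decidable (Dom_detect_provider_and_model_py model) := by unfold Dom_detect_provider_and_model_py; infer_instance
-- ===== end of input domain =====

-- B replaces A's two sequential startswith-scans by one character trie over all 24 keys,
-- answered by a single recursive walk down the model's characters (alternative algorithm;
-- correct because no key is a prefix of another key, so at most one key matches).

-- ===== PORT A =====
-- module constants shared by both Pythons (dict → association list, insertion order)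
def pvProviderPrefixes : List (String × String) :=
  [("openai/", "openai"), ("anthropic/", "anthropic"), ("azure/", "azure"),
   ("google/", "google"), ("vertex_ai/", "google"), ("bedrock/", "aws"),
   ("cohere/", "cohere"), ("mistral/", "mistral"), ("deepseek/", "deepseek"),
   ("groq/", "groq"), ("together_ai/", "together"), ("anyscale/", "anyscale"),
   ("ollama/", "ollama"), ("huggingface/", "huggingface"),
   ("replicate/", "replicate"), ("sagemaker/", "aws")]

def pvModelHints : List (String × String) :=
  [("gpt-", "openai"), ("o1", "openai"), ("o3", "openai"),
   ("claude-", "anthropic"), ("gemini-", "google"), ("mistral-", "mistral"),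
   ("command-", "cohere"), ("llama-", "meta")]

-- A's 'for prefix, provider in _PROVIDER_PREFIXES.items()' loop; model[len(prefix):] = Str.slice
def pvProvLoop : List (String × String) → String → Option (String × String)
  | [], _ => none
  | (pfx, provider) :: rest, m =>
    if PySem.Str.startswith m pfx then
      some (provider, PySem.Str.slice m (some (PySem.Str.len pfx)) none)
    else pvProvLoop rest m

-- A's 'for hint, provider in _MODEL_PROVIDER_HINTS.items()' loop
def pvHintLoop : List (String × String) → String → Option String
  | [], _ => none
  | (hint, provider) :: rest, m =>
    if PySem.Str.startswith m hint then some provider else pvHintLoop rest m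

def detect_provider_and_model_py (model : String) : String × String :=
  match pvProvLoop pvProviderPrefixes model with
  | some r => r
  | none =>
    match pvHintLoop pvModelHints model with
    | some provider => (provider, model)
    | none => ("unknown", model)

-- ===== PORT B =====
-- Source B's nested-dict trie: a node is a terminal payload (node[""]) plus children keyed by Char
mutual
inductive PvTrie : Type where
  | node : Option (String × Int) → PvKids → PvTrie
inductive PvKids : Type where
  | nil : PvKids
  | cons : Char → PvTrie → PvKids → PvKids
end

def pvTrieEmpty : PvTrie := PvTrie.node none PvKids.nil

def pvKidsGet : PvKids → Char → Option PvTrie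
  | PvKids.nil, _ => none
  | PvKids.cons d u rest, c => if d = c then some u else pvKidsGet rest c

def pvKidsSet : PvKids → Char → PvTrie → PvKids
  | PvKids.nil, c, t => PvKids.cons c t PvKids.nil
  | PvKids.cons d u rest, c, t =>
    if d = c then PvKids.cons d t rest else PvKids.cons d u (pvKidsSet rest c t)

-- Source B's _add: walk the key with setdefault, then set the terminal payload
def pvInsert : PvTrie → List Char → (String × Int) → PvTrie
  | PvTrie.node _ kids, [], v => PvTrie.node (some v) kids
  | PvTrie.node val kids, c :: ks, v =>
    PvTrie.node val
      (pvKidsSet kids c (pvInsert ((pvKidsGet kids c).getD pvTrieEmpty) ks v))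

def pvBuild (entries : List (List Char × (String × Int))) : PvTrie :=
  entries.foldl (fun t e => pvInsert t e.1 e.2) pvTrieEmpty

-- the module-level build loops: provider prefixes store (provider, len(prefix)), hints (provider, 0)
def pvEntries : List (List Char × (String × Int)) :=
  pvProviderPrefixes.map (fun q => (q.1.toList, (q.2, PySem.Str.len q.1))) ++
  pvModelHints.map (fun q => (q.1.toList, (q.2, (0 : Int))))

def pvTrie : PvTrie := pvBuild pvEntries

-- Source B's _lookup
def pvLookup : PvTrie → List Char → Option (String × Int)
  | PvTrie.node (some v) _, _ => some v
  | PvTrie.node none _, [] => none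
  | PvTrie.node none kids, c :: rest =>
    match pvKidsGet kids c with
    | none => none
    | some child => pvLookup child rest

def detect_provider_and_model_py_alt (model : String) : String × String :=
  match pvLookup pvTrie model.toList with
  | none => ("unknown", model)
  | some (provider, strip) => (provider, PySem.Str.slice model (some strip) none)

-- ===== PRECONDITION & SPEC =====
def Spec_detect_provider_and_model_py (model : String) (out : String × String) : Prop := out = detect_provider_and_model_py_alt model
instance (model : String) (out : String × String) : Decidable (Spec_detect_provider_and_model_py model out) := by unfold Spec_detect_provider_and_model_py; infer_instance

-- ===== CLAIM (what is proved, stated in full; the proofs are below) =====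
def Claim_equal_detect_provider_and_model_py : Prop := ∀ (model : String), Dom_detect_provider_and_model_py model → Spec_detect_provider_and_model_py model (detect_provider_and_model_py model)

-- ===== LEMMAS AND PROOFS =====

-- the linear-scan semantics both ports are reduced to
def pvScan (E : List (List Char × (String × Int))) (s : List Char) : Option (String × Int) :=
  (E.find? (fun e => e.1.isPrefixOf s)).map (fun e => e.2)

-- prefix-freeness: no key is a prefix of another (holds for the 24 concrete keys, by decide)
def pvPF (E : List (List Char × (String × Int))) : Prop :=
  E.Pairwise (fun a b => ¬ a.1 <+: b.1 ∧ ¬ b.1 <+: a.1)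

-- entries whose key starts with c, with that first character removed
def pvEf (E : List (List Char × (String × Int))) (c : Char) : List (List Char × (String × Int)) :=
  E.filterMap (fun e =>
    match e.1 with
    | [] => none
    | d :: ks => if d = c then some (ks, e.2) else none)

def pvRoot : PvTrie → Option (String × Int) | PvTrie.node v _ => v
def pvKidsOf : PvTrie → PvKids | PvTrie.node _ k => k

theorem pv_kget_kset (kids : PvKids) (c : Char) (t : PvTrie) (d : Char) :
    pvKidsGet (pvKidsSet kids c t) d = if d = c then some t else pvKidsGet kids d := by
  match kids with
  | PvKids.nil =>
    by_cases h : d = c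
    · simp [pvKidsSet, pvKidsGet, h]
    · simp [pvKidsSet, pvKidsGet, h, show ¬c = d from fun hh => h hh.symm]
  | PvKids.cons a u rest =>
    by_cases hac : a = c
    · subst hac
      by_cases h : d = a
      · subst h; simp [pvKidsSet, pvKidsGet]
      · simp [pvKidsSet, pvKidsGet, h, show ¬a = d from fun hh => h hh.symm]
    · by_cases had : a = d
      · subst had
        simp [pvKidsSet, pvKidsGet, hac, show ¬a = c from hac,
          show ¬c = a from fun hh => hac hh.symm]
      · simp [pvKidsSet, pvKidsGet, hac, had, pv_kget_kset rest c t d]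

theorem pv_root_insert_cons (t : PvTrie) (c : Char) (ks : List Char) (v : String × Int) :
    pvRoot (pvInsert t (c :: ks) v) = pvRoot t := by cases t; rfl

theorem pv_kids_insert_nil (t : PvTrie) (v : String × Int) :
    pvKidsOf (pvInsert t [] v) = pvKidsOf t := by cases t; rfl

theorem pv_kget_insert_cons (t : PvTrie) (c : Char) (ks : List Char) (v : String × Int) (d : Char) :
    pvKidsGet (pvKidsOf (pvInsert t (c :: ks) v)) d =
      if d = c then some (pvInsert ((pvKidsGet (pvKidsOf t) c).getD pvTrieEmpty) ks v)
      else pvKidsGet (pvKidsOf t) d := by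
  cases t; simp [pvInsert, pvKidsOf, pv_kget_kset]

theorem pv_root_foldl (E : List (List Char × (String × Int))) (t : PvTrie)
    (h : ∀ e ∈ E, e.1 ≠ []) :
    pvRoot (E.foldl (fun t e => pvInsert t e.1 e.2) t) = pvRoot t := by
  induction E generalizing t with
  | nil => rfl
  | cons e E ih =>
    rw [List.foldl_cons, ih _ (fun x hx => h x (List.mem_cons_of_mem _ hx))]
    cases he1 : e.1 with
    | nil => exact absurd he1 (h e List.mem_cons_self)
    | cons c ks => exact pv_root_insert_cons t c ks e.2

theorem pv_kget_foldl (E : List (List Char × (String × Int))) (t : PvTrie) (c : Char) :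
    pvKidsGet (pvKidsOf (E.foldl (fun t e => pvInsert t e.1 e.2) t)) c =
      (pvEf E c).foldl (fun o e => some (pvInsert (o.getD pvTrieEmpty) e.1 e.2))
        (pvKidsGet (pvKidsOf t) c) := by
  induction E generalizing t with
  | nil => rfl
  | cons e E ih =>
    obtain ⟨k, v⟩ := e
    match k with
    | [] =>
      rw [List.foldl_cons, ih]
      simp [pvEf, pv_kids_insert_nil]
    | d :: ks =>
      rw [List.foldl_cons, ih]
      by_cases hdc : d = c
      · subst hdc
        simp [pvEf, pv_kget_insert_cons, List.filterMap_cons]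
      · simp [pvEf, pv_kget_insert_cons, hdc,
          show ¬c = d from fun hh => hdc hh.symm, List.filterMap_cons]

theorem pv_foldl_some (L : List (List Char × (String × Int))) (u : PvTrie) :
    L.foldl (fun o e => some (pvInsert (o.getD pvTrieEmpty) e.1 e.2)) (some u) =
      some (L.foldl (fun t e => pvInsert t e.1 e.2) u) := by
  induction L generalizing u with
  | nil => rfl
  | cons e L ih => simp [List.foldl_cons, ih]

theorem pv_kget_build (E : List (List Char × (String × Int))) (c : Char) :
    pvKidsGet (pvKidsOf (pvBuild E)) c =
      match pvEf E c with
      | [] => none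
      | e :: rest => some (pvBuild (pvEf E c)) := by
  rw [pvBuild, pv_kget_foldl]
  cases h : pvEf E c with
  | nil => rfl
  | cons e rest =>
    show (e :: rest).foldl _ (pvKidsGet PvKids.nil c) = _
    simp only [pvKidsGet, List.foldl_cons, Option.getD_none, pv_foldl_some]
    rw [pvBuild, List.foldl_cons]

-- an entry with the empty key forces, under prefix-freeness, a singleton table
theorem pv_pf_empty_key (E : List (List Char × (String × Int))) (hPF : pvPF E)
    (e : List Char × (String × Int)) (he : e ∈ E) (hk : e.1 = []) :
    E = [e] := by
  cases E with
  | nil => cases he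
  | cons a rest =>
    rcases List.mem_cons.mp he with rfl | hr
    · cases rest with
      | nil => rfl
      | cons b rest' =>
        refine absurd ?_ ((List.pairwise_cons.mp hPF).1 b List.mem_cons_self).1
        rw [hk]; exact List.nil_prefix
    · refine absurd ?_ (((List.pairwise_cons.mp hPF).1 e hr).2)
      rw [hk]; exact List.nil_prefix

theorem pv_pf_ef (E : List (List Char × (String × Int))) (c : Char) (hPF : pvPF E) :
    pvPF (pvEf E c) := by
  refine List.Pairwise.filterMap _ ?_ hPF
  rintro ⟨ka, va⟩ ⟨kb, vb⟩ hr ⟨ka', va'⟩ ha ⟨kb', vb'⟩ hb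
  cases ka with
  | nil => simp at ha
  | cons da ksa =>
    cases kb with
    | nil => simp at hb
    | cons db ksb =>
      by_cases hda : da = c
      · by_cases hdb : db = c
        · subst hda hdb
          simp only [if_pos rfl] at ha hb
          injection ha with ha; injection hb with hb
          cases ha; cases hb
          constructor
          · intro hpre; exact hr.1 (List.cons_prefix_cons.mpr ⟨rfl, hpre⟩)
          · intro hpre; exact hr.2 (List.cons_prefix_cons.mpr ⟨rfl, hpre⟩)
        · simp [hdb] at hb
      · simp [hda] at ha

theorem pv_scan_ef (E : List (List Char × (String × Int))) (c : Char) (s : List Char)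
    (h : ∀ e ∈ E, e.1 ≠ []) :
    pvScan E (c :: s) = pvScan (pvEf E c) s := by
  induction E with
  | nil => rfl
  | cons e E ih =>
    obtain ⟨k, v⟩ := e
    have ih' := ih (fun x hx => h x (List.mem_cons_of_mem _ hx))
    simp only [pvScan] at ih' ⊢
    cases k with
    | nil => exact ((h ([], v) List.mem_cons_self) rfl).elim
    | cons d ks =>
      have hEf : pvEf ((d :: ks, v) :: E) c =
          (if d = c then [(ks, v)] else []) ++ pvEf E c := by
        by_cases hdc : d = c <;> simp [pvEf, List.filterMap_cons, hdc]
      rw [hEf]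
      by_cases hdc : d = c
      · subst hdc
        rw [if_pos rfl, List.singleton_append]
        by_cases hp : ks.isPrefixOf s
        · rw [List.find?_cons_of_pos (by simp [List.isPrefixOf, hp]),
            List.find?_cons_of_pos (by simpa using hp)]
          rfl
        · rw [List.find?_cons_of_neg (by simp [List.isPrefixOf, hp]),
            List.find?_cons_of_neg (by simpa using hp)]
          exact ih'
      · rw [if_neg hdc, List.nil_append,
          List.find?_cons_of_neg (by simp [List.isPrefixOf, hdc])]
        exact ih'

-- trie correctness: on a prefix-free table, the trie walk computes the linear scan
theorem pv_trie_correct (s : List Char) (E : List (List Char × (String × Int)))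
    (hPF : pvPF E) : pvLookup (pvBuild E) s = pvScan E s := by
  induction s generalizing E with
  | nil =>
    by_cases hE : ∀ e ∈ E, e.1 ≠ []
    · cases ht : pvBuild E with
      | node rv kids =>
        have hr : rv = none := by
          have h0 := pv_root_foldl E pvTrieEmpty hE
          rw [← pvBuild, ht] at h0; exact h0
        subst hr
        have hsc : pvScan E [] = none := by
          rw [pvScan, List.find?_eq_none.mpr]
          · rfl
          · intro e he hp
            exact hE e he (by simpa [List.isPrefixOf_iff_prefix, List.prefix_nil] using hp)
        rw [hsc]; rfl
    · push_neg at hE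
      obtain ⟨e, he, hk⟩ := hE
      rw [pv_pf_empty_key E hPF e he hk]
      obtain ⟨k, v⟩ := e
      cases k with
      | nil => rfl
      | cons a ks => exact absurd hk (by simp)
  | cons c s ih =>
    by_cases hE : ∀ e ∈ E, e.1 ≠ []
    · cases ht : pvBuild E with
      | node rv kids =>
        have hr : rv = none := by
          have h0 := pv_root_foldl E pvTrieEmpty hE
          rw [← pvBuild, ht] at h0; exact h0
        subst hr
        have hk := pv_kget_build E c
        rw [ht] at hk
        simp only [pvKidsOf] at hk
        cases hf : pvEf E c with
        | nil =>
          have hk' : pvKidsGet kids c = none := by rw [hf] at hk; exact hk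
          simp only [pvLookup, hk']
          rw [pvScan, List.find?_eq_none.mpr]
          · rfl
          · intro e he hp
            obtain ⟨k, v⟩ := e
            cases k with
            | nil => exact (hE ([], v) he rfl).elim
            | cons d ks =>
              rw [List.isPrefixOf_iff_prefix, List.cons_prefix_cons] at hp
              have hmem : (ks, v) ∈ pvEf E c := by
                unfold pvEf
                rw [List.mem_filterMap]
                exact ⟨(d :: ks, v), he, by simp [hp.1]⟩
              rw [hf] at hmem
              exact absurd hmem (by simp)
        | cons e0 rest =>
          have hk' : pvKidsGet kids c = some (pvBuild (pvEf E c)) := by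
            rw [hf] at hk ⊢; exact hk
          simp only [pvLookup, hk']
          rw [ih (pvEf E c) (pv_pf_ef E c hPF), pv_scan_ef E c s hE]
    · push_neg at hE
      obtain ⟨e, he, hk⟩ := hE
      rw [pv_pf_empty_key E hPF e he hk]
      obtain ⟨k, v⟩ := e
      cases k with
      | nil => rfl
      | cons a ks => exact absurd hk (by simp)

theorem pv_pf_entries : pvPF pvEntries := by
  unfold pvPF pvEntries pvProviderPrefixes pvModelHints
  decide

theorem pv_startswith_eq (m p : String) :
    PySem.Str.startswith m p = p.toList.isPrefixOf m.toList := by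
  rw [Bool.eq_iff_iff, List.isPrefixOf_iff_prefix, ← PySem.Chars.startswith_iff]
  simp

theorem pv_provLoop_eq_find (ps : List (String × String)) (m : String) :
    pvProvLoop ps m =
      (ps.find? (fun q => q.1.toList.isPrefixOf m.toList)).map
        (fun q => (q.2, PySem.Str.slice m (some (PySem.Str.len q.1)) none)) := by
  induction ps with
  | nil => rfl
  | cons q ps ih =>
    obtain ⟨pfx, provider⟩ := q
    rw [pvProvLoop, pv_startswith_eq]
    by_cases h : pfx.toList.isPrefixOf m.toList <;> simp [h, ih]

theorem pv_hintLoop_eq_find (ps : List (String × String)) (m : String) :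
    pvHintLoop ps m =
      (ps.find? (fun q => q.1.toList.isPrefixOf m.toList)).map (fun q => q.2) := by
  induction ps with
  | nil => rfl
  | cons q ps ih =>
    obtain ⟨hint, provider⟩ := q
    rw [pvHintLoop, pv_startswith_eq]
    by_cases h : hint.toList.isPrefixOf m.toList <;> simp [h, ih]

theorem pv_slice_zero (m : String) : PySem.Str.slice m (some 0) none = m := by
  apply String.toList_inj.mp
  rw [PySem.Str.toList_slice, PySem.Chars.slice_eq_listSlice,
    PySem.List.slice_zero_start, PySem.List.slice_none_none]

theorem pv_find_prov (m : String) :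
    ((pvProviderPrefixes.map (fun q => (q.1.toList, (q.2, PySem.Str.len q.1)))).find?
        (fun e => e.1.isPrefixOf m.toList)) =
      (pvProviderPrefixes.find? (fun q => q.1.toList.isPrefixOf m.toList)).map
        (fun q => (q.1.toList, (q.2, PySem.Str.len q.1))) := by
  rw [List.find?_map]; rfl

theorem pv_find_hint (m : String) :
    ((pvModelHints.map (fun q => (q.1.toList, (q.2, (0 : Int))))).find?
        (fun e => e.1.isPrefixOf m.toList)) =
      (pvModelHints.find? (fun q => q.1.toList.isPrefixOf m.toList)).map
        (fun q => (q.1.toList, (q.2, (0 : Int)))) := by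
  rw [List.find?_map]; rfl

-- ===== VERDICT (by name: the statement is the Claim_ definition above) =====
theorem detect_provider_and_model_py_spec : Claim_equal_detect_provider_and_model_py := by
  intro model _
  unfold Spec_detect_provider_and_model_py
  unfold detect_provider_and_model_py detect_provider_and_model_py_alt
  rw [show pvTrie = pvBuild pvEntries from rfl,
    pv_trie_correct model.toList pvEntries pv_pf_entries]
  rw [pv_provLoop_eq_find, pv_hintLoop_eq_find]
  unfold pvScan pvEntries
  rw [List.find?_append, pv_find_prov, pv_find_hint]
  cases pvProviderPrefixes.find? (fun q => q.1.toList.isPrefixOf model.toList) with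
  | some q => rfl
  | none =>
    cases pvModelHints.find? (fun q => q.1.toList.isPrefixOf model.toList) with
    | some q =>
      show (q.2, model) = (q.2, PySem.Str.slice model (some ((0 : Int))) none)
      rw [pv_slice_zero]
    | none => rfl
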